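-- pv_equiv track=rewrite | github.com/kvsaiakhil/triple_fp_units | verif/generate_triple_fp_vectors.py | permute_triples
-- ===== SOURCE A (Python) =====
-- from typing import Iterable
--
-- def permute_triples(triples: Iterable[tuple[int, int, int]]):
--     out = []
--     seen = set()
--     for a, b, c in triples:
--         for perm in (
--             (a, b, c),
--             (a, c, b),
--             (b, a, c),
--             (b, c, a),
--             (c, a, b),
--             (c, b, a),
--         ):
--             if perm not in seen:
--                 seen.add(perm)
--                 out.append(perm)
--     return out
-- ===== SOURCE B (Python) =====
-- def permute_triples(triples):
--     # Group-level dedup: two triples generate overlapping permutations iff they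
--     # have the same multiset of components, so we skip whole triples whose
--     # canonical key (min, middle, max) was seen, and dedup only inside each
--     # fresh triple's six permutations (handles repeated components) -- no
--     # global set of emitted permutations is kept.
--     out = []
--     seen_keys = set()
--     for a, b, c in triples:
--         lo = min(a, b, c)
--         hi = max(a, b, c)
--         key = (lo, a + b + c - lo - hi, hi)
--         if key in seen_keys:
--             continue
--         seen_keys.add(key)
--         group = []
--         for p in ((a, b, c), (a, c, b), (b, a, c), (b, c, a), (c, a, b), (c, b, a)):
--             if p not in group:
--                 group.append(p)
--         out.extend(group)
--     return out
-- ===== Notes on version B (the rewrite author's own statement) =====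
-- stated objective: alternative
-- what changed: A keeps one global set of every emitted permutation and tests each of the 6 permutations of every triple against it; B instead skips a whole triple when its canonical sorted key (min, middle, max) was already seen and deduplicates only within the fresh triple's own six permutations, exploiting that triples with different component multisets generate disjoint permutation sets.
import Mathlib
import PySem

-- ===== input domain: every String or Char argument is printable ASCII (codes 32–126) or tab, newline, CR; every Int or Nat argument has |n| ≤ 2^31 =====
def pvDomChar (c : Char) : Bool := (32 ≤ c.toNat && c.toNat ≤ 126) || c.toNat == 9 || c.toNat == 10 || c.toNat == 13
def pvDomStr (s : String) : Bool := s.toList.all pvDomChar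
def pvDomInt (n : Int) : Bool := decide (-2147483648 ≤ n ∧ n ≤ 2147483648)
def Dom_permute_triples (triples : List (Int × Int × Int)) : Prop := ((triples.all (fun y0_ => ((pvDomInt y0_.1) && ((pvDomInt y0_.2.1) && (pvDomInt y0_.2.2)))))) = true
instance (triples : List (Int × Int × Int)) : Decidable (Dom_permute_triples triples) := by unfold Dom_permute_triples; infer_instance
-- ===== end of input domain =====

-- B replaces A's global set of emitted permutations by a per-triple grouping: a triple
-- is skipped wholesale when its sorted-multiset key was already seen, and only its own
-- six permutations are deduplicated locally; same output, different data structure.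

-- the literal 6-tuple of permutations both Pythons write out
def pvPerms (t : Int × Int × Int) : List (Int × Int × Int) :=
  [(t.1, t.2.1, t.2.2), (t.1, t.2.2, t.2.1), (t.2.1, t.1, t.2.2),
   (t.2.1, t.2.2, t.1), (t.2.2, t.1, t.2.1), (t.2.2, t.2.1, t.1)]

-- ===== PORT A =====
-- A's inner loop body: if perm not in seen: seen.add(perm); out.append(perm)
def pvInnerA (st : List (Int × Int × Int) × PySem.Set (Int × Int × Int))
    (p : Int × Int × Int) : List (Int × Int × Int) × PySem.Set (Int × Int × Int) :=
  if PySem.Set.contains st.2 p then st else (st.1 ++ [p], PySem.Set.add st.2 p)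

def permute_triples (triples : List (Int × Int × Int)) : List (Int × Int × Int) :=
  (triples.foldl (fun st t => (pvPerms t).foldl pvInnerA st)
    (([] : List (Int × Int × Int)), (PySem.Set.empty : PySem.Set (Int × Int × Int)))).1

-- ===== PORT B =====
-- Source B's key = (lo, a+b+c-lo-hi, hi) with lo = min(a,b,c), hi = max(a,b,c)
def pvKey (t : Int × Int × Int) : Int × Int × Int :=
  (min t.1 (min t.2.1 t.2.2),
   t.1 + t.2.1 + t.2.2 - min t.1 (min t.2.1 t.2.2) - max t.1 (max t.2.1 t.2.2),
   max t.1 (max t.2.1 t.2.2))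

-- Source B's local loop body: if p not in group: group.append(p)
def pvLocal (g : List (Int × Int × Int)) (p : Int × Int × Int) : List (Int × Int × Int) :=
  if g.contains p then g else g ++ [p]

-- Source B's outer loop body: skip if key seen, else add key and extend out with the local group
def pvStepB (st : List (Int × Int × Int) × PySem.Set (Int × Int × Int))
    (t : Int × Int × Int) : List (Int × Int × Int) × PySem.Set (Int × Int × Int) :=
  if PySem.Set.contains st.2 (pvKey t) then st
  else (st.1 ++ (pvPerms t).foldl pvLocal [], PySem.Set.add st.2 (pvKey t))

def permute_triples_alt (triples : List (Int × Int × Int)) : List (Int × Int × Int) :=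
  (triples.foldl pvStepB
    (([] : List (Int × Int × Int)), (PySem.Set.empty : PySem.Set (Int × Int × Int)))).1

-- ===== PRECONDITION & SPEC =====
def Spec_permute_triples (triples : List (Int × Int × Int)) (out : List (Int × Int × Int)) : Prop := out = permute_triples_alt triples
instance (triples : List (Int × Int × Int)) (out : List (Int × Int × Int)) : Decidable (Spec_permute_triples triples out) := by unfold Spec_permute_triples; infer_instance

-- ===== CLAIM (what is proved, stated in full; the proofs are below) =====
def Claim_equal_permute_triples : Prop := ∀ (triples : List (Int × Int × Int)), Dom_permute_triples triples → Spec_permute_triples triples (permute_triples triples)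

-- ===== LEMMAS AND PROOFS =====

-- 3-element permutation constructors
theorem pv_perm3_swap12 {α : Type} (u v w : α) : [u, v, w].Perm [v, u, w] :=
  List.Perm.swap v u [w]
theorem pv_perm3_swap23 {α : Type} (u v w : α) : [u, v, w].Perm [u, w, v] :=
  List.Perm.cons u (List.Perm.swap w v [])
theorem pv_perm3_rot {α : Type} (u v w : α) : [u, v, w].Perm [w, u, v] :=
  (pv_perm3_swap23 u v w).trans (List.Perm.swap w u [v])

-- every triple is a permutation of its sorted key components
theorem pv_perm_key (x y z : Int) :
    [x, y, z].Perm [(pvKey (x,y,z)).1, (pvKey (x,y,z)).2.1, (pvKey (x,y,z)).2.2] := by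
  simp only [pvKey]
  rcases le_total x y with hxy | hxy <;> rcases le_total y z with hyz | hyz <;>
    rcases le_total x z with hxz | hxz
  all_goals
    first
    | (have h1 : min x (min y z) = x := by omega
       have h2 : x + y + z - min x (min y z) - max x (max y z) = y := by omega
       have h3 : max x (max y z) = z := by omega
       rw [h2, h1, h3])
    | (have h1 : min x (min y z) = x := by omega
       have h2 : x + y + z - min x (min y z) - max x (max y z) = z := by omega
       have h3 : max x (max y z) = y := by omega
       rw [h2, h1, h3]
       exact pv_perm3_swap23 x y z)
    | (have h1 : min x (min y z) = y := by omega
       have h2 : x + y + z - min x (min y z) - max x (max y z) = x := by omega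
       have h3 : max x (max y z) = z := by omega
       rw [h2, h1, h3]
       exact pv_perm3_swap12 x y z)
    | (have h1 : min x (min y z) = y := by omega
       have h2 : x + y + z - min x (min y z) - max x (max y z) = z := by omega
       have h3 : max x (max y z) = x := by omega
       rw [h2, h1, h3]
       exact (pv_perm3_rot y z x).symm)
    | (have h1 : min x (min y z) = z := by omega
       have h2 : x + y + z - min x (min y z) - max x (max y z) = x := by omega
       have h3 : max x (max y z) = y := by omega
       rw [h2, h1, h3]
       exact pv_perm3_rot x y z)
    | (have h1 : min x (min y z) = z := by omega
       have h2 : x + y + z - min x (min y z) - max x (max y z) = y := by omega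
       have h3 : max x (max y z) = x := by omega
       rw [h2, h1, h3]
       exact (pv_perm3_rot x y z).trans (pv_perm3_swap23 z x y))

-- a permutation of (a,b,c)'s components is one of the six listed permutations
theorem pv_perm_mem (x y z a b c : Int) (h : [x, y, z].Perm [a, b, c]) :
    (x, y, z) ∈ pvPerms (a, b, c) := by
  have hx : x = a ∨ x = b ∨ x = c := by simpa using h.mem_iff.mp (by simp)
  simp only [pvPerms, List.mem_cons, List.not_mem_nil, or_false]
  rcases hx with hx | hx | hx
  · subst hx
    have h2 : [y, z].Perm [b, c] := (List.perm_cons x).mp h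
    have hy : y = b ∨ y = c := by simpa using h2.mem_iff.mp (by simp)
    rcases hy with hy | hy
    · subst hy
      have h3 : [z].Perm [c] := (List.perm_cons y).mp h2
      have : z = c := by simpa using h3.mem_iff.mp (by simp)
      subst this; simp
    · subst hy
      have h3 : [z].Perm [b] := (List.perm_cons y).mp (h2.trans (List.Perm.swap _ _ []))
      have : z = b := by simpa using h3.mem_iff.mp (by simp)
      subst this; simp
  · subst hx
    have h2 : [y, z].Perm [a, c] := (List.perm_cons x).mp (h.trans (pv_perm3_swap12 a x c))
    have hy : y = a ∨ y = c := by simpa using h2.mem_iff.mp (by simp)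
    rcases hy with hy | hy
    · subst hy
      have h3 : [z].Perm [c] := (List.perm_cons y).mp h2
      have : z = c := by simpa using h3.mem_iff.mp (by simp)
      subst this; simp
    · subst hy
      have h3 : [z].Perm [a] := (List.perm_cons y).mp (h2.trans (List.Perm.swap _ _ []))
      have : z = a := by simpa using h3.mem_iff.mp (by simp)
      subst this; simp
  · subst hx
    have h2 : [y, z].Perm [a, b] := (List.perm_cons x).mp (h.trans (pv_perm3_rot a b x))
    have hy : y = a ∨ y = b := by simpa using h2.mem_iff.mp (by simp)
    rcases hy with hy | hy
    · subst hy
      have h3 : [z].Perm [b] := (List.perm_cons y).mp h2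
      have : z = b := by simpa using h3.mem_iff.mp (by simp)
      subst this; simp
    · subst hy
      have h3 : [z].Perm [a] := (List.perm_cons y).mp (h2.trans (List.Perm.swap _ _ []))
      have : z = a := by simpa using h3.mem_iff.mp (by simp)
      subst this; simp

-- membership in the six permutations is exactly equality of sorted keys
theorem pv_mem_perms_iff (p t : Int × Int × Int) :
    p ∈ pvPerms t ↔ pvKey p = pvKey t := by
  obtain ⟨x, y, z⟩ := p
  obtain ⟨a, b, c⟩ := t
  constructor
  · intro h
    simp only [pvPerms, List.mem_cons, List.not_mem_nil, or_false] at h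
    rcases h with h | h | h | h | h | h <;>
      (injection h with h1 h'; injection h' with h2 h3; subst h1; subst h2; subst h3) <;>
      (simp only [pvKey, Prod.mk.injEq] <;> refine ⟨by omega, by omega, by omega⟩)
  · intro h
    have hp := pv_perm_key x y z
    have ht := (pv_perm_key a b c).symm
    rw [h] at hp
    exact pv_perm_mem x y z a b c (hp.trans ht)

-- if every element of ps is already seen, A's inner loop is a no-op
theorem pv_inner_id (ps : List (Int × Int × Int))
    (st : List (Int × Int × Int) × PySem.Set (Int × Int × Int))
    (h : ∀ p ∈ ps, p ∈ st.2) : ps.foldl pvInnerA st = st := by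
  induction ps generalizing st with
  | nil => rfl
  | cons q ps ih =>
    rw [List.foldl_cons]
    have : pvInnerA st q = st := by
      simp [pvInnerA, PySem.Set.contains_eq_listContains, h q (by simp)]
    rw [this]
    exact ih st (fun p hp => h p (by simp [hp]))

-- A's inner loop against seen-set s appends exactly Source B's local dedup loop,
-- whenever membership in s and in the local group g agree on the elements of ps
theorem pv_inner_out (ps : List (Int × Int × Int)) (o g : List (Int × Int × Int))
    (s : PySem.Set (Int × Int × Int))
    (h : ∀ p ∈ ps, (p ∈ s ↔ p ∈ g)) :
    (ps.foldl pvInnerA (o ++ g, s)).1 = o ++ ps.foldl pvLocal g := by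
  induction ps generalizing g s with
  | nil => rfl
  | cons q ps ih =>
    rw [List.foldl_cons, List.foldl_cons]
    by_cases hq : q ∈ s
    · have hg : q ∈ g := (h q (by simp)).mp hq
      have hA : pvInnerA (o ++ g, s) q = (o ++ g, s) := by
        simp [pvInnerA, PySem.Set.contains_eq_listContains, hq]
      have hB : pvLocal g q = g := by
        simp only [pvLocal, if_pos (List.contains_iff_mem.mpr hg)]
      rw [hA, hB]
      exact ih g s (fun p hp => h p (by simp [hp]))
    · have hg : q ∉ g := fun hg => hq ((h q (by simp)).mpr hg)
      have hA : pvInnerA (o ++ g, s) q = (o ++ (g ++ [q]), PySem.Set.add s q) := by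
        simp [pvInnerA, PySem.Set.contains_eq_listContains, hq, List.append_assoc]
      have hB : pvLocal g q = g ++ [q] := by
        simp only [pvLocal]
        rw [if_neg (fun hc => hg (List.contains_iff_mem.mp hc))]
      rw [hA, hB]
      refine ih (g ++ [q]) (PySem.Set.add s q) (fun p hp => ?_)
      rw [PySem.Set.mem_add, List.mem_append, List.mem_singleton]
      exact or_congr (h p (by simp [hp])) Iff.rfl

-- membership in A's seen-set after the inner loop
theorem pv_inner_seen (ps : List (Int × Int × Int))
    (st : List (Int × Int × Int) × PySem.Set (Int × Int × Int)) (p : Int × Int × Int) :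
    p ∈ (ps.foldl pvInnerA st).2 ↔ p ∈ st.2 ∨ p ∈ ps := by
  induction ps generalizing st with
  | nil => simp
  | cons q ps ih =>
    rw [List.foldl_cons]
    by_cases hq : q ∈ st.2
    · have hA : pvInnerA st q = st := by
        simp [pvInnerA, PySem.Set.contains_eq_listContains, hq]
      rw [hA, ih]
      constructor
      · rintro (h | h) <;> simp [h]
      · rintro (h | h)
        · exact Or.inl h
        · rcases List.mem_cons.mp h with h | h
          · exact Or.inl (h ▸ hq)
          · exact Or.inr h
    · have hA : pvInnerA st q = (st.1 ++ [q], PySem.Set.add st.2 q) := by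
        simp only [pvInnerA]
        rw [if_neg (by simp only [PySem.Set.contains_eq_listContains]; exact fun hc => hq (List.contains_iff_mem.mp hc))]
      rw [hA, ih]
      simp only [PySem.Set.mem_add, List.mem_cons]
      tauto

-- the two outer loops produce the same output list whenever membership in A's
-- seen-set of permutations corresponds to membership of the key in B's key-set
theorem pv_outer (l : List (Int × Int × Int)) (o : List (Int × Int × Int))
    (s k : PySem.Set (Int × Int × Int))
    (hinv : ∀ p, p ∈ s ↔ pvKey p ∈ k) :
    (l.foldl (fun st t => (pvPerms t).foldl pvInnerA st) (o, s)).1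
      = (l.foldl pvStepB (o, k)).1 := by
  induction l generalizing o s k with
  | nil => rfl
  | cons t l ih =>
    rw [List.foldl_cons, List.foldl_cons]
    by_cases hk : pvKey t ∈ k
    · have hall : ∀ p ∈ pvPerms t, p ∈ (o, s).2 := fun p hp => by
        exact (hinv p).mpr (((pv_mem_perms_iff p t).mp hp) ▸ hk)
      rw [pv_inner_id (pvPerms t) (o, s) hall]
      have hB : pvStepB (o, k) t = (o, k) := by
        simp [pvStepB, PySem.Set.contains_eq_listContains, hk]
      rw [hB]
      exact ih o s k hinv
    · have hnone : ∀ p ∈ pvPerms t, (p ∈ s ↔ p ∈ ([] : List (Int × Int × Int))) := by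
        intro p hp
        simp only [List.not_mem_nil, iff_false]
        exact fun hs => hk (((pv_mem_perms_iff p t).mp hp) ▸ (hinv p).mp hs)
      have hres : (pvPerms t).foldl pvInnerA (o, s)
          = ((o ++ (pvPerms t).foldl pvLocal []), ((pvPerms t).foldl pvInnerA (o, s)).2) := by
        refine Prod.ext ?_ rfl
        have := pv_inner_out (pvPerms t) o [] s hnone
        simpa using this
      have hB : pvStepB (o, k) t
          = (o ++ (pvPerms t).foldl pvLocal [], PySem.Set.add k (pvKey t)) := by
        simp [pvStepB, PySem.Set.contains_eq_listContains, hk]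
      rw [hres, hB]
      refine ih _ _ _ (fun p => ?_)
      rw [pv_inner_seen, PySem.Set.mem_add]
      exact or_congr (hinv p) (pv_mem_perms_iff p t)

-- ===== VERDICT (by name: the statement is the Claim_ definition above) =====
theorem permute_triples_spec : Claim_equal_permute_triples := by
  intro triples _
  unfold Spec_permute_triples permute_triples permute_triples_alt
  exact pv_outer triples [] PySem.Set.empty PySem.Set.empty (by simp [PySem.Set.empty])
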